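-- pv_equiv track=rewrite | github.com/kaihirota/Problem-Solving | contests/leet_code_weekly_contest_189/3.py | peopleIndexes
-- ===== SOURCE A (Python) =====
-- from typing import List
--
-- def peopleIndexes(favoriteCompanies: List[List[str]]) -> List[int]:
--     idx = list(range(len(favoriteCompanies)))
--     for i in range(len(favoriteCompanies)):
--         s1 = set(favoriteCompanies[i])
--         for j in range(len(favoriteCompanies)):
--             if i != j:
--                 s2 = set(favoriteCompanies[j])
--                 if s1.intersection(s2) == s2 and j in idx:
--                     idx.remove(j)
--
--     return idx
-- ===== SOURCE B (Python) =====
-- from typing import List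
--
-- def peopleIndexes(favoriteCompanies: List[List[str]]) -> List[int]:
--     n = len(favoriteCompanies)
--     # inverted index: company -> set of persons whose list contains it
--     holders = {}
--     for p in range(n):
--         for c in favoriteCompanies[p]:
--             holders.setdefault(c, set()).add(p)
--     everyone = set(range(n))
--     res = []
--     for i in range(n):
--         # persons whose favorites contain every company of person i
--         supersets = everyone
--         for c in favoriteCompanies[i]:
--             supersets = supersets & holders.get(c, set())
--         if supersets == {i}:
--             res.append(i)
--     return res
-- ===== Notes on version B (the rewrite author's own statement) =====
-- stated objective: faster
-- what changed: Replaces A's all-pairs subset test with repeated set building by an inverted index (company -> set of holders) built once; each person is kept iff the intersection of the holder sets of their companies is exactly themselves.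
import Mathlib
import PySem

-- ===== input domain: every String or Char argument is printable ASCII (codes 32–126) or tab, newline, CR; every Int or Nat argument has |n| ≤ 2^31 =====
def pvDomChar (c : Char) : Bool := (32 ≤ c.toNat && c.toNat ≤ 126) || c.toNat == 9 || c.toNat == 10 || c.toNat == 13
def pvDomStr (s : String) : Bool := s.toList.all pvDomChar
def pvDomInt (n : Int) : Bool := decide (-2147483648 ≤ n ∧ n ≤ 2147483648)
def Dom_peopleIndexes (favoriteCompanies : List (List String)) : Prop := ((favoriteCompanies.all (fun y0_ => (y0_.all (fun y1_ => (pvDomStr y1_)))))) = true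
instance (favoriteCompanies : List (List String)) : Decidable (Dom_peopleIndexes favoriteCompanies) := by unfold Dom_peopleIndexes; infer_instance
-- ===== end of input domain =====

-- B replaces A's all-pairs subset test by an inverted index (company -> holder set) and keeps a
-- person iff the intersection of the holder sets of their companies is exactly themselves.

-- ===== PORT A =====
def peopleIndexes (favoriteCompanies : List (List String)) : List Int :=
  let n : Int := (favoriteCompanies.length : Int)
  let idx : List Int := PySem.List.pyRange 0 n 1
  (PySem.List.pyRange 0 n 1).foldl (fun idx i =>
    let s1 : PySem.Set String := PySem.Set.ofList (PySem.List.pyGetD favoriteCompanies i [])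
    (PySem.List.pyRange 0 n 1).foldl (fun idx j =>
      if i ≠ j then
        let s2 : PySem.Set String := PySem.Set.ofList (PySem.List.pyGetD favoriteCompanies j [])
        if PySem.Set.equal (PySem.Set.inter s1 s2) s2 && idx.contains j then
          (PySem.List.remove? idx j).getD idx   -- j ∈ idx was just checked: remove? never raises here
        else idx
      else idx) idx) idx

-- ===== PORT B =====
def peopleIndexes_alt (favoriteCompanies : List (List String)) : List Int :=
  let n : Int := (favoriteCompanies.length : Int)
  let holders : PySem.Dict String (PySem.Set Int) :=
    (PySem.List.pyRange 0 n 1).foldl (fun d p =>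
      (PySem.List.pyGetD favoriteCompanies p []).foldl
        (fun d c => d.modify c [] (fun s => PySem.Set.add s p)) d) PySem.Dict.empty
  let everyone : PySem.Set Int := PySem.Set.ofList (PySem.List.pyRange 0 n 1)
  (PySem.List.pyRange 0 n 1).foldl (fun res i =>
    let supersets : PySem.Set Int :=
      (PySem.List.pyGetD favoriteCompanies i []).foldl
        (fun s c => PySem.Set.inter s (holders.getD c [])) everyone
    if PySem.Set.equal supersets (PySem.Set.ofList [i]) then res ++ [i] else res) []

-- ===== PRECONDITION & SPEC =====
def Spec_peopleIndexes (favoriteCompanies : List (List String)) (out : List Int) : Prop := out = peopleIndexes_alt favoriteCompanies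
instance (favoriteCompanies : List (List String)) (out : List Int) : Decidable (Spec_peopleIndexes favoriteCompanies out) := by unfold Spec_peopleIndexes; infer_instance

-- ===== CLAIM (what is proved, stated in full; the proofs are below) =====
def Claim_equal_peopleIndexes : Prop := ∀ (favoriteCompanies : List (List String)), Dom_peopleIndexes favoriteCompanies → Spec_peopleIndexes favoriteCompanies (peopleIndexes favoriteCompanies)

-- ===== LEMMAS AND PROOFS =====

-- fc[i] as the Python indexes it inside both loops (i always in range here)
def pvGet (fc : List (List String)) (i : Int) : List String := PySem.List.pyGetD fc i []

-- Bool: "set(fc[j]) ⊆ set(fc[i]) and i ≠ j" — the removal condition of A's inner loop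
def pvCb (fc : List (List String)) (i j : Int) : Bool :=
  decide (i ≠ j) && PySem.Set.equal
    (PySem.Set.inter (PySem.Set.ofList (pvGet fc i)) (PySem.Set.ofList (pvGet fc j)))
    (PySem.Set.ofList (pvGet fc j))

lemma pvCb_iff (fc : List (List String)) (i j : Int) :
    pvCb fc i j = true ↔ i ≠ j ∧ ∀ c ∈ pvGet fc j, c ∈ pvGet fc i := by
  simp only [pvCb, Bool.and_eq_true, decide_eq_true_eq, PySem.Set.equal_iff,
    PySem.Set.mem_inter, PySem.Set.mem_ofList]
  constructor
  · rintro ⟨hne, h⟩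
    exact ⟨hne, fun c hc => ((h c).mpr hc).1⟩
  · rintro ⟨hne, h⟩
    exact ⟨hne, fun c => ⟨fun hc => hc.2, fun hc => ⟨h c hc, hc⟩⟩⟩

-- A's step function, in combined form
lemma pvStepA_eq (fc : List (List String)) (i : Int) :
    (fun (idx : List Int) (j : Int) =>
      if i ≠ j then
        if PySem.Set.equal (PySem.Set.inter (PySem.Set.ofList (pvGet fc i)) (PySem.Set.ofList (pvGet fc j)))
             (PySem.Set.ofList (pvGet fc j)) && idx.contains j then
          (PySem.List.remove? idx j).getD idx
        else idx
      else idx)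
    = (fun idx j => if pvCb fc i j && idx.contains j then (PySem.List.remove? idx j).getD idx else idx) := by
  funext idx j
  by_cases h : i = j <;> simp [pvCb, h]

-- inner loop over js: removals = filtering
lemma pvInner (C : Int → Bool) :
    ∀ (js idx : List Int), idx.Nodup →
      js.foldl (fun acc j => if C j && acc.contains j then (PySem.List.remove? acc j).getD acc else acc) idx
      = idx.filter (fun v => !(js.contains v && C v)) := by
  intro js
  induction js with
  | nil => intro idx _; simp
  | cons j js ih =>
    intro idx hnd
    simp only [List.foldl_cons]
    by_cases hC : C j = true
    · by_cases hj : j ∈ idx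
      · rw [if_pos (by simp [hC, hj]), PySem.List.remove?_eq_some_erase idx j hj, Option.getD_some,
          List.Nodup.erase_eq_filter hnd, ih _ (hnd.filter _), List.filter_filter]
        refine List.filter_congr ?_
        intro v hv
        by_cases hvj : v = j <;> simp [hvj, hC]
      · have : (if C j && idx.contains j then (PySem.List.remove? idx j).getD idx else idx) = idx := by
          simp [hj]
        rw [this, ih _ hnd]
        refine List.filter_congr ?_
        intro v hv
        have hvj : v ≠ j := fun h => hj (h ▸ hv)
        simp [hvj]
    · have hC' : C j = false := by simpa using hC
      rw [if_neg (by simp [hC']), ih _ hnd]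
      refine List.filter_congr ?_
      intro v hv
      by_cases hvj : v = j <;> simp [hvj, hC']

-- A's loops seen abstractly (literal step functions): removals = one big filter
lemma pvOuterA (fc : List (List String)) (R : List Int) :
    ∀ (is idx : List Int), idx.Nodup →
      is.foldl (fun idx i =>
        R.foldl (fun idx j =>
          if i ≠ j then
            if PySem.Set.equal
                 (PySem.Set.inter (PySem.Set.ofList (PySem.List.pyGetD fc i []))
                   (PySem.Set.ofList (PySem.List.pyGetD fc j [])))
                 (PySem.Set.ofList (PySem.List.pyGetD fc j [])) && idx.contains j then
              (PySem.List.remove? idx j).getD idx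
            else idx
          else idx) idx) idx
      = idx.filter (fun v => is.all (fun i => !(R.contains v && pvCb fc i v))) := by
  intro is
  induction is with
  | nil => intro idx _; simp
  | cons i is ih =>
    intro idx hnd
    simp only [List.foldl_cons]
    rw [show (fun (idx : List Int) (j : Int) =>
          if i ≠ j then
            if PySem.Set.equal
                 (PySem.Set.inter (PySem.Set.ofList (PySem.List.pyGetD fc i []))
                   (PySem.Set.ofList (PySem.List.pyGetD fc j [])))
                 (PySem.Set.ofList (PySem.List.pyGetD fc j [])) && idx.contains j then
              (PySem.List.remove? idx j).getD idx
            else idx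
          else idx)
        = (fun idx j => if pvCb fc i j && idx.contains j then (PySem.List.remove? idx j).getD idx else idx)
        from pvStepA_eq fc i]
    rw [pvInner (pvCb fc i) R idx hnd, ih _ (hnd.filter _), List.filter_filter]
    refine List.filter_congr ?_
    intro v _
    simp [Bool.and_comm]

-- characterisation of A
lemma pvA_eq (fc : List (List String)) :
    peopleIndexes fc
    = (PySem.List.pyRange 0 (fc.length : Int) 1).filter (fun v =>
        (PySem.List.pyRange 0 (fc.length : Int) 1).all (fun i =>
          !((PySem.List.pyRange 0 (fc.length : Int) 1).contains v && pvCb fc i v))) := by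
  exact pvOuterA fc _ _ _ (PySem.List.nodup_pyRange_one 0 (fc.length : Int))

-- B-side: dict membership
lemma pvDictInner (p : Int) :
    ∀ (cs : List String) (d : PySem.Dict String (PySem.Set Int)) (c : String) (x : Int),
      x ∈ (cs.foldl (fun d c => d.modify c [] (fun s => PySem.Set.add s p)) d).getD c []
      ↔ x ∈ d.getD c [] ∨ (c ∈ cs ∧ x = p) := by
  intro cs
  induction cs with
  | nil => intro d c x; simp
  | cons c0 cs ih =>
    intro d c x
    simp only [List.foldl_cons]
    rw [ih]
    by_cases h : c = c0
    · subst h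
      rw [PySem.Dict.getD_modify_self]
      simp [PySem.Set.mem_add, or_comm, or_left_comm]
      tauto
    · rw [PySem.Dict.getD_modify_of_ne _ _ _ h]
      simp [h]

lemma pvDictOuter (fc : List (List String)) :
    ∀ (ps : List Int) (d : PySem.Dict String (PySem.Set Int)) (c : String) (x : Int),
      x ∈ (ps.foldl (fun d p => (PySem.List.pyGetD fc p []).foldl (fun d c => d.modify c [] (fun s => PySem.Set.add s p)) d) d).getD c []
      ↔ x ∈ d.getD c [] ∨ ∃ p ∈ ps, c ∈ PySem.List.pyGetD fc p [] ∧ x = p := by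
  intro ps
  induction ps with
  | nil => intro d c x; simp
  | cons p ps ih =>
    intro d c x
    simp only [List.foldl_cons]
    rw [ih, pvDictInner]
    simp
    by_cases hxp : x = p
    · subst hxp; tauto
    · tauto

-- Intersection loop membership (H fixed so the foldl matches the port syntactically)
lemma pvInterFold (H : PySem.Dict String (PySem.Set Int)) :
    ∀ (cs : List String) (s0 : PySem.Set Int) (x : Int),
      x ∈ cs.foldl (fun s c => PySem.Set.inter s (H.getD c [])) s0
      ↔ x ∈ s0 ∧ ∀ c ∈ cs, x ∈ H.getD c [] := by
  intro cs
  induction cs with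
  | nil => intro s0 x; simp
  | cons c cs ih =>
    intro s0 x
    simp only [List.foldl_cons]
    rw [ih]
    simp [PySem.Set.mem_inter]
    tauto

-- membership in the inverted index, from empty
lemma pvHolders_mem (fc : List (List String)) (c : String) (x : Int) :
    x ∈ ((PySem.List.pyRange 0 (fc.length : Int) 1).foldl
          (fun d p => (PySem.List.pyGetD fc p []).foldl (fun d c => d.modify c [] (fun s => PySem.Set.add s p)) d)
          PySem.Dict.empty).getD c []
    ↔ x ∈ PySem.List.pyRange 0 (fc.length : Int) 1 ∧ c ∈ PySem.List.pyGetD fc x [] := by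
  rw [pvDictOuter]
  simp only [PySem.Dict.getD_empty, List.not_mem_nil, false_or]
  constructor
  · rintro ⟨p, hp, hc, rfl⟩; exact ⟨hp, hc⟩
  · rintro ⟨hx, hc⟩; exact ⟨x, hx, hc, rfl⟩

-- characterisation of B
lemma pvB_eq (fc : List (List String)) :
    peopleIndexes_alt fc
    = (PySem.List.pyRange 0 (fc.length : Int) 1).filter (fun v =>
        decide (∀ p ∈ PySem.List.pyRange 0 (fc.length : Int) 1,
          (∀ c ∈ PySem.List.pyGetD fc v [], c ∈ PySem.List.pyGetD fc p []) → p = v)) := by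
  have hrw := PySem.List.foldl_append_if
    (fun (i : Int) => PySem.Set.equal
        ((PySem.List.pyGetD fc i []).foldl
          (fun s c => PySem.Set.inter s
            (((PySem.List.pyRange 0 (fc.length : Int) 1).foldl
              (fun d p => (PySem.List.pyGetD fc p []).foldl (fun d c => d.modify c [] (fun s => PySem.Set.add s p)) d)
              PySem.Dict.empty).getD c []))
          (PySem.Set.ofList (PySem.List.pyRange 0 (fc.length : Int) 1)))
        (PySem.Set.ofList [i]))
    (fun (i : Int) => i) (PySem.List.pyRange 0 (fc.length : Int) 1) []
  rw [show peopleIndexes_alt fc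
      = (PySem.List.pyRange 0 (fc.length : Int) 1).foldl
          (fun res i => if PySem.Set.equal
              ((PySem.List.pyGetD fc i []).foldl
                (fun s c => PySem.Set.inter s
                  (((PySem.List.pyRange 0 (fc.length : Int) 1).foldl
                    (fun d p => (PySem.List.pyGetD fc p []).foldl (fun d c => d.modify c [] (fun s => PySem.Set.add s p)) d)
                    PySem.Dict.empty).getD c []))
                (PySem.Set.ofList (PySem.List.pyRange 0 (fc.length : Int) 1)))
              (PySem.Set.ofList [i]) then res ++ [i] else res) []
      from rfl]
  rw [hrw]
  simp only [List.nil_append, List.map_id_fun', id_eq]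
  refine List.filter_congr ?_
  intro v hv
  rw [Bool.eq_iff_iff, PySem.Set.equal_iff]
  simp only [decide_eq_true_eq]
  constructor
  · intro h p hp hsub
    have hmem : p ∈ (PySem.List.pyGetD fc v []).foldl
        (fun s c => PySem.Set.inter s
          (((PySem.List.pyRange 0 (fc.length : Int) 1).foldl
            (fun d p => (PySem.List.pyGetD fc p []).foldl (fun d c => d.modify c [] (fun s => PySem.Set.add s p)) d)
            PySem.Dict.empty).getD c []))
        (PySem.Set.ofList (PySem.List.pyRange 0 (fc.length : Int) 1)) := by
      rw [pvInterFold]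
      refine ⟨(PySem.Set.mem_ofList _ _).mpr hp, ?_⟩
      intro c hc
      exact (pvHolders_mem fc c p).mpr ⟨hp, hsub c hc⟩
    have := (h p).mp hmem
    simpa using this
  · intro h x
    rw [pvInterFold]
    simp only [PySem.Set.mem_ofList, List.mem_singleton]
    constructor
    · rintro ⟨hxR, hall⟩
      exact h x hxR (fun c hc => ((pvHolders_mem fc c x).mp (hall c hc)).2)
    · rintro rfl
      exact ⟨hv, fun c hc => (pvHolders_mem fc c x).mpr ⟨hv, hc⟩⟩

-- ===== VERDICT (by name: the statement is the Claim_ definition above) =====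
theorem peopleIndexes_spec : Claim_equal_peopleIndexes := by
  intro fc _
  unfold Spec_peopleIndexes
  rw [pvA_eq, pvB_eq]
  refine List.filter_congr ?_
  intro v hv
  rw [Bool.eq_iff_iff]
  simp only [List.all_eq_true, Bool.not_eq_true', Bool.and_eq_false_iff, decide_eq_true_eq]
  constructor
  · intro h p hp hsub
    rcases h p hp with hnv | hcb
    · simp [List.contains_eq_mem, hv] at hnv
    · by_contra hne
      have : pvCb fc p v = true := (pvCb_iff fc p v).mpr ⟨hne, by simpa [pvGet] using hsub⟩
      simp [this] at hcb
  · intro h i hi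
    right
    have : ¬ (pvCb fc i v = true) := by
      rw [pvCb_iff]
      rintro ⟨hne, hsub⟩
      exact hne (h i hi (by simpa [pvGet] using hsub))
    simpa using this
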